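-- pv_equiv track=rewrite | github.com/jd1977/scorps-fulltime-scraper | archive/get_boys_fixtures.py | format_fixtures_output
-- ===== SOURCE A (Python) =====
-- from typing import List, Dict
--
-- def format_fixtures_output(fixtures: List[Dict]) -> str:
--     """Format fixtures for display."""
--     if not fixtures:
--         return "❌ No boys fixtures found for 01/03/2026"
--
--     output = f"🦂 Scawthorpe Scorpions Boys Fixtures - 01/03/2026\n"
--     output += "=" * 60 + "\n\n"
--
--     # Group by time
--     fixtures_by_time = {}
--     for fixture in fixtures:
--         time_key = fixture.get('time', 'TBC')
--         if time_key not in fixtures_by_time: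
--             fixtures_by_time[time_key] = []
--         fixtures_by_time[time_key].append(fixture)
--
--     # Sort by time
--     sorted_times = sorted(fixtures_by_time.keys(), key=lambda x: x if x != 'TBC' else 'ZZ:ZZ')
--
--     for time_slot in sorted_times:
--         output += f"🕐 {time_slot}\n"
--         output += "-" * 20 + "\n"
--
--         for fixture in fixtures_by_time[time_slot]:
--             team_name = fixture['team']
--             home_team = fixture.get('home_team', '')
--             away_team = fixture.get('away_team', '')
--             venue = fixture.get('venue', '')
--             league = fixture.get('league', '')
--
--             if home_team and away_team:
--                 output += f"⚽ {home_team} vs {away_team}\n"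
--             else:
--                 output += f"⚽ {team_name}\n"
--
--             if venue:
--                 output += f"   📍 {venue}\n"
--             if league:
--                 output += f"   🏆 {league[:50]}...\n"
--
--             output += "\n"
--
--     output += f"📊 Total Fixtures: {len(fixtures)}\n"
--
--     return output
-- ===== SOURCE B (Python) =====
-- from typing import List, Dict
--
-- def format_fixtures_output(fixtures: List[Dict]) -> str:
--     """Format fixtures for display."""
--     if not fixtures:
--         return "❌ No boys fixtures found for 01/03/2026"
--
--     lines = ["🦂 Scawthorpe Scorpions Boys Fixtures - 01/03/2026", "=" * 60, ""]
--
--     times = sorted(dict.fromkeys(f.get('time', 'TBC') for f in fixtures),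
--                    key=lambda t: 'ZZ:ZZ' if t == 'TBC' else t)
--
--     for t in times:
--         lines.append(f"🕐 {t}")
--         lines.append("-" * 20)
--         for f in fixtures:
--             if f.get('time', 'TBC') != t:
--                 continue
--             home, away = f.get('home_team', ''), f.get('away_team', '')
--             if home and away:
--                 lines.append(f"⚽ {home} vs {away}")
--             else:
--                 lines.append(f"⚽ {f['team']}")
--             if f.get('venue', ''):
--                 lines.append(f"   📍 {f.get('venue', '')}")
--             if f.get('league', ''):
--                 lines.append(f"   🏆 {f.get('league', '')[:50]}...")
--             lines.append("")
--
--     lines.append(f"📊 Total Fixtures: {len(fixtures)}")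
--     return "\n".join(lines) + "\n"
-- ===== Notes on version B (the rewrite author's own statement) =====
-- stated objective: idiomatic
-- what changed: B drops the dict-of-lists grouping and string concatenation: it sorts the ordered-deduplicated time keys (dict.fromkeys), emits each group by a per-time filter pass over the fixtures, collects output lines in a list and joins them once with newline.
import Mathlib
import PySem

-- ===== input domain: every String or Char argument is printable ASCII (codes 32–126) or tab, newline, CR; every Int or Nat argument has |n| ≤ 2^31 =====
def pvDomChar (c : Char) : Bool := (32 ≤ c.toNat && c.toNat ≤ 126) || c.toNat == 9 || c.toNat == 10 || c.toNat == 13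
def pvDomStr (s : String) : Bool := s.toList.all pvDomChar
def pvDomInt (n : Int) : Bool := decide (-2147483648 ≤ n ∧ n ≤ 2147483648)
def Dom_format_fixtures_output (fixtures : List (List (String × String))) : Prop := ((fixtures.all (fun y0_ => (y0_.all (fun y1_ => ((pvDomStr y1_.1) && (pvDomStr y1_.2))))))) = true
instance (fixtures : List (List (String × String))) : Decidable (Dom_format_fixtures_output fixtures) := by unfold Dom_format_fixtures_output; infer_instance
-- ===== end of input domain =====

-- B replaces A's dict-of-lists grouping and string concatenation by sorting the ordered-deduplicated
-- time keys, a per-time filter pass over the fixtures, and one '\n'.join over a list of lines (idiomatic).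

-- ===== PORT A =====
def format_fixtures_output (fixtures : List (List (String × String))) : String :=
  if fixtures = [] then
    "❌ No boys fixtures found for 01/03/2026"
  else
    let output := "🦂 Scawthorpe Scorpions Boys Fixtures - 01/03/2026\n"
    let output := output ++ "============================================================" ++ "\n\n"
    -- Group by time
    let fixtures_by_time : PySem.Dict String (List (List (String × String))) :=
      fixtures.foldl (fun d fixture =>
        let time_key := PySem.Dict.getD ⟨fixture⟩ "time" "TBC"
        let d := if d.contains time_key then d else d.insert time_key []
        d.modify time_key [] (fun v => v ++ [fixture])) PySem.Dict.empty
    -- Sort by time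
    let sorted_times := PySem.List.sorted fixtures_by_time.keys (fun x => if x ≠ "TBC" then x else "ZZ:ZZ") false
    let output := sorted_times.foldl (fun output time_slot =>
      let output := output ++ "🕐 " ++ time_slot ++ "\n"
      let output := output ++ "--------------------" ++ "\n"
      (fixtures_by_time.getD time_slot []).foldl (fun output fixture =>
        -- fixture['team']: Pre_ guarantees the key is present (Python raises KeyError otherwise)
        let team_name := PySem.Dict.getD ⟨fixture⟩ "team" ""
        let home_team := PySem.Dict.getD ⟨fixture⟩ "home_team" ""
        let away_team := PySem.Dict.getD ⟨fixture⟩ "away_team" ""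
        let venue := PySem.Dict.getD ⟨fixture⟩ "venue" ""
        let league := PySem.Dict.getD ⟨fixture⟩ "league" ""
        let output := if home_team ≠ "" ∧ away_team ≠ "" then
            output ++ "⚽ " ++ home_team ++ " vs " ++ away_team ++ "\n"
          else
            output ++ "⚽ " ++ team_name ++ "\n"
        let output := if venue ≠ "" then output ++ "   📍 " ++ venue ++ "\n" else output
        let output := if league ≠ "" then
            output ++ "   🏆 " ++ PySem.Str.slice league none (some 50) ++ "..." ++ "\n"
          else output
        output ++ "\n") output) output
    output ++ "📊 Total Fixtures: " ++ PySem.Int.toStr (fixtures.length : Int) ++ "\n"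

-- ===== PORT B =====
def format_fixtures_output_alt (fixtures : List (List (String × String))) : String :=
  if fixtures = [] then
    "❌ No boys fixtures found for 01/03/2026"
  else
    let lines := ["🦂 Scawthorpe Scorpions Boys Fixtures - 01/03/2026",
                  "============================================================", ""]
    let times := PySem.List.sorted
      (PySem.List.dedup (fixtures.map (fun f => PySem.Dict.getD ⟨f⟩ "time" "TBC")))
      (fun t => if t = "TBC" then "ZZ:ZZ" else t) false
    let lines := times.foldl (fun lines t =>
      let lines := lines ++ ["🕐 " ++ t]
      let lines := lines ++ ["--------------------"]
      fixtures.foldl (fun lines f =>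
        if PySem.Dict.getD ⟨f⟩ "time" "TBC" ≠ t then lines
        else
          let home := PySem.Dict.getD ⟨f⟩ "home_team" ""
          let away := PySem.Dict.getD ⟨f⟩ "away_team" ""
          let lines := if home ≠ "" ∧ away ≠ "" then
              lines ++ ["⚽ " ++ home ++ " vs " ++ away]
            else
              lines ++ ["⚽ " ++ PySem.Dict.getD ⟨f⟩ "team" ""]
          let lines := if PySem.Dict.getD ⟨f⟩ "venue" "" ≠ "" then
              lines ++ ["   📍 " ++ PySem.Dict.getD ⟨f⟩ "venue" ""]
            else lines
          let lines := if PySem.Dict.getD ⟨f⟩ "league" "" ≠ "" then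
              lines ++ ["   🏆 " ++ PySem.Str.slice (PySem.Dict.getD ⟨f⟩ "league" "") none (some 50) ++ "..."]
            else lines
          lines ++ [""]) lines) lines
    let lines := lines ++ ["📊 Total Fixtures: " ++ PySem.Int.toStr (fixtures.length : Int)]
    PySem.Str.join "\n" lines ++ "\n"

-- ===== PRECONDITION & SPEC =====
-- Pre_ excludes exactly the inputs where Python A raises KeyError: a fixture without a 'team' key.
def Pre_format_fixtures_output (fixtures : List (List (String × String))) : Prop :=
  ∀ f ∈ fixtures, (PySem.Dict.get? (⟨f⟩ : PySem.Dict String String) "team").isSome = true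
instance (fixtures : List (List (String × String))) : Decidable (Pre_format_fixtures_output fixtures) := by
  unfold Pre_format_fixtures_output; infer_instance
def pvWitness_format_fixtures_output : (List (List (String × String))) :=
  [[("team", "U10 Scorpions"), ("time", "09:00")], [("team", "U12 Scorpions")]]
def Spec_format_fixtures_output (fixtures : List (List (String × String))) (out : String) : Prop := out = format_fixtures_output_alt fixtures
instance (fixtures : List (List (String × String))) (out : String) : Decidable (Spec_format_fixtures_output fixtures out) := by unfold Spec_format_fixtures_output; infer_instance

-- ===== CLAIM (what is proved, stated in full; the proofs are below) =====
def Claim_equal_format_fixtures_output : Prop := ∀ (fixtures : List (List (String × String))), Dom_format_fixtures_output fixtures → Pre_format_fixtures_output fixtures → Spec_format_fixtures_output fixtures (format_fixtures_output fixtures)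

-- ===== LEMMAS AND PROOFS =====

-- abbreviations for the proofs (not used by the ports or the claim)
def pvTk (f : List (String × String)) : String := PySem.Dict.getD ⟨f⟩ "time" "TBC"

def pvStep (d : PySem.Dict String (List (List (String × String)))) (fixture : List (String × String)) :
    PySem.Dict String (List (List (String × String))) :=
  (if d.contains (pvTk fixture) then d else d.insert (pvTk fixture) []).modify (pvTk fixture) [] (fun v => v ++ [fixture])

def pvInnerA (output : String) (f : List (String × String)) : String :=
  ((if PySem.Dict.getD (⟨f⟩ : PySem.Dict String String) "home_team" "" ≠ "" ∧
       PySem.Dict.getD (⟨f⟩ : PySem.Dict String String) "away_team" "" ≠ "" then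
      output ++ "⚽ " ++ PySem.Dict.getD (⟨f⟩ : PySem.Dict String String) "home_team" "" ++ " vs " ++
        PySem.Dict.getD (⟨f⟩ : PySem.Dict String String) "away_team" "" ++ "\n"
    else
      output ++ "⚽ " ++ PySem.Dict.getD (⟨f⟩ : PySem.Dict String String) "team" "" ++ "\n") |>
   (fun output => if PySem.Dict.getD (⟨f⟩ : PySem.Dict String String) "venue" "" ≠ "" then
      output ++ "   📍 " ++ PySem.Dict.getD (⟨f⟩ : PySem.Dict String String) "venue" "" ++ "\n" else output) |>
   (fun output => if PySem.Dict.getD (⟨f⟩ : PySem.Dict String String) "league" "" ≠ "" then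
      output ++ "   🏆 " ++ PySem.Str.slice (PySem.Dict.getD (⟨f⟩ : PySem.Dict String String) "league" "") none (some 50) ++ "..." ++ "\n"
    else output)) ++ "\n"

def pvInnerB (t : String) (lines : List String) (f : List (String × String)) : List String :=
  if pvTk f ≠ t then lines
  else
    ((if PySem.Dict.getD (⟨f⟩ : PySem.Dict String String) "home_team" "" ≠ "" ∧
         PySem.Dict.getD (⟨f⟩ : PySem.Dict String String) "away_team" "" ≠ "" then
        lines ++ ["⚽ " ++ PySem.Dict.getD (⟨f⟩ : PySem.Dict String String) "home_team" "" ++ " vs " ++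
          PySem.Dict.getD (⟨f⟩ : PySem.Dict String String) "away_team" ""]
      else
        lines ++ ["⚽ " ++ PySem.Dict.getD (⟨f⟩ : PySem.Dict String String) "team" ""]) |>
     (fun lines => if PySem.Dict.getD (⟨f⟩ : PySem.Dict String String) "venue" "" ≠ "" then
        lines ++ ["   📍 " ++ PySem.Dict.getD (⟨f⟩ : PySem.Dict String String) "venue" ""] else lines) |>
     (fun lines => if PySem.Dict.getD (⟨f⟩ : PySem.Dict String String) "league" "" ≠ "" then
        lines ++ ["   🏆 " ++ PySem.Str.slice (PySem.Dict.getD (⟨f⟩ : PySem.Dict String String) "league" "") none (some 50) ++ "..."]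
      else lines)) ++ [""]

-- the body lines one fixture contributes
def pvBody (f : List (String × String)) : List String :=
  (if PySem.Dict.getD (⟨f⟩ : PySem.Dict String String) "home_team" "" ≠ "" ∧
      PySem.Dict.getD (⟨f⟩ : PySem.Dict String String) "away_team" "" ≠ "" then
     ["⚽ " ++ PySem.Dict.getD (⟨f⟩ : PySem.Dict String String) "home_team" "" ++ " vs " ++
        PySem.Dict.getD (⟨f⟩ : PySem.Dict String String) "away_team" ""]
   else
     ["⚽ " ++ PySem.Dict.getD (⟨f⟩ : PySem.Dict String String) "team" ""]) ++
  (if PySem.Dict.getD (⟨f⟩ : PySem.Dict String String) "venue" "" ≠ "" then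
     ["   📍 " ++ PySem.Dict.getD (⟨f⟩ : PySem.Dict String String) "venue" ""] else []) ++
  (if PySem.Dict.getD (⟨f⟩ : PySem.Dict String String) "league" "" ≠ "" then
     ["   🏆 " ++ PySem.Str.slice (PySem.Dict.getD (⟨f⟩ : PySem.Dict String String) "league" "") none (some 50) ++ "..."]
   else []) ++ [""]

-- the fixtures of one time slot, and the whole document as a list of lines
def pvF (fixtures : List (List (String × String))) (t : String) : List (List (String × String)) :=
  fixtures.filter (fun f => pvTk f == t)

def pvTimes (fixtures : List (List (String × String))) : List String :=
  PySem.List.sorted (PySem.Set.ofList (fixtures.map pvTk)) (fun t => if t = "TBC" then "ZZ:ZZ" else t) false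

def pvGroup (fixtures : List (List (String × String))) (t : String) : List String :=
  ["🕐 " ++ t, "--------------------"] ++ (pvF fixtures t).flatMap pvBody

def pvAll (fixtures : List (List (String × String))) : List String :=
  ["🦂 Scawthorpe Scorpions Boys Fixtures - 01/03/2026",
   "============================================================", ""] ++
  (pvTimes fixtures).flatMap (pvGroup fixtures) ++
  ["📊 Total Fixtures: " ++ PySem.Int.toStr (fixtures.length : Int)]

-- render a list of lines the way A writes them: every line followed by '\n'
def pvRender (ls : List String) : String := String.join (ls.map (· ++ "\n"))

-- ---- generic string lemmas ----
lemma pv_strFoldl (l : List String) (a : String) : l.foldl (· ++ ·) a = a ++ String.join l := by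
  induction l generalizing a with
  | nil => show a = a ++ "" ; simp
  | cons x xs ih =>
    show xs.foldl (· ++ ·) (a ++ x) = a ++ String.join (x :: xs)
    rw [ih]
    have h : String.join (x :: xs) = x ++ String.join xs := by
      show xs.foldl (· ++ ·) ("" ++ x) = _
      rw [ih]; simp
    rw [h, String.append_assoc]

lemma pv_join_cons (s : String) (rest : List String) : String.join (s :: rest) = s ++ String.join rest := by
  show rest.foldl (· ++ ·) ("" ++ s) = _
  rw [pv_strFoldl]; simp

lemma pvTk_def : pvTk = fun f => PySem.Dict.getD ⟨f⟩ "time" "TBC" := rfl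

lemma pv_strFoldl_map {α : Type} (g : α → String) (l : List α) (a : String) :
    l.foldl (fun acc x => acc ++ g x) a = a ++ String.join (l.map g) := by
  induction l generalizing a with
  | nil => simp [String.join]
  | cons x xs ih =>
    show xs.foldl (fun acc x => acc ++ g x) (a ++ g x) = _
    rw [ih, List.map_cons, pv_join_cons, String.append_assoc]

lemma pv_join_append (l₁ l₂ : List String) : String.join (l₁ ++ l₂) = String.join l₁ ++ String.join l₂ := by
  show (l₁ ++ l₂).foldl (· ++ ·) "" = _
  rw [List.foldl_append, pv_strFoldl, pv_strFoldl]
  simp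

lemma pv_render_append (l₁ l₂ : List String) : pvRender (l₁ ++ l₂) = pvRender l₁ ++ pvRender l₂ := by
  unfold pvRender
  rw [List.map_append, pv_join_append]

lemma pv_render_cons (x : String) (ls : List String) :
    pvRender (x :: ls) = (x ++ "\n") ++ pvRender ls := by
  unfold pvRender
  rw [List.map_cons, pv_join_cons]

lemma pv_render_nil : pvRender [] = "" := rfl

lemma pv_dash_split (x : String) : x ++ "\n--------------------\n" = (x ++ "\n") ++ "--------------------\n" := by
  have h : ("\n--------------------\n" : String) = "\n" ++ "--------------------\n" := rfl
  rw [h, ← String.append_assoc]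

lemma pv_render_flatMap {α : Type} (g : α → List String) (l : List α) :
    pvRender (l.flatMap g) = String.join (l.map (fun x => pvRender (g x))) := by
  induction l with
  | nil => simp [pvRender, String.join]
  | cons x xs ih =>
    rw [List.flatMap_cons, pv_render_append, ih, List.map_cons, pv_join_cons]

lemma pv_join_cons_cons (x y : String) (ys : List String) :
    PySem.Str.join "\n" (x :: y :: ys) = x ++ "\n" ++ PySem.Str.join "\n" (y :: ys) := by
  rw [← String.toList_inj]
  simp [PySem.Str.toList_join, PySem.Chars.join_cons_cons]

lemma pv_joinNL (x : String) (ls : List String) :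
    PySem.Str.join "\n" (x :: ls) ++ "\n" = pvRender (x :: ls) := by
  induction ls generalizing x with
  | nil => simp [PySem.Str.join, pvRender, String.join]
  | cons y ys ih =>
    rw [pv_join_cons_cons, String.append_assoc, ih]
    show _ = String.join ((x ++ "\n") :: ((y :: ys).map (· ++ "\n")))
    rw [pv_join_cons]
    rfl

-- ---- the grouping dict of A ----
lemma pv_step_getD (d : PySem.Dict String (List (List (String × String)))) (f : List (String × String)) (t : String) :
    (pvStep d f).getD t [] = if pvTk f = t then d.getD t [] ++ [f] else d.getD t [] := by
  unfold pvStep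
  rw [PySem.Dict.getD_modify]
  by_cases ht : t = pvTk f
  · rw [if_pos ht, if_pos ht.symm, ht]
    by_cases hc : d.contains (pvTk f) = true
    · rw [if_pos hc]
    · rw [if_neg hc, PySem.Dict.getD_insert_self,
        PySem.Dict.getD_of_not_contains d [] (by simpa using hc)]
  · rw [if_neg ht, if_neg (show ¬ pvTk f = t from fun h => ht h.symm)]
    by_cases hc : d.contains (pvTk f) = true
    · rw [if_pos hc]
    · rw [if_neg hc, PySem.Dict.getD_insert_of_ne d [] [] ht]

lemma pv_step_keys (d : PySem.Dict String (List (List (String × String)))) (f : List (String × String)) :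
    (pvStep d f).keys = PySem.Set.add d.keys (pvTk f) := by
  unfold pvStep
  rw [PySem.Dict.keys_modify]
  by_cases hc : d.contains (pvTk f) = true
  · rw [if_pos hc, PySem.Dict.keys_insert_of_contains,
      PySem.Set.add_of_mem ((PySem.Dict.contains_iff_mem_keys _ _).mp hc)]
    exact hc
  · rw [if_neg hc, PySem.Dict.keys_insert_of_contains _ _ (PySem.Dict.contains_insert_self _ _ _),
      PySem.Dict.keys_insert_of_not_contains _ _ (by simpa using hc),
      PySem.Set.add_of_not_mem (fun hm => hc ((PySem.Dict.contains_iff_mem_keys _ _).mpr hm))]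

lemma pv_fold_getD (l : List (List (String × String))) (d : PySem.Dict String (List (List (String × String)))) (t : String) :
    (l.foldl pvStep d).getD t [] = d.getD t [] ++ l.filter (fun f => pvTk f == t) := by
  induction l generalizing d with
  | nil => simp
  | cons f l ih =>
    simp only [List.foldl_cons, List.filter_cons, ih, pv_step_getD]
    by_cases h : pvTk f = t <;> simp [h]

lemma pv_fold_keys (l : List (List (String × String))) (d : PySem.Dict String (List (List (String × String)))) :
    (l.foldl pvStep d).keys = PySem.Set.update d.keys (l.map pvTk) := by
  induction l generalizing d with
  | nil => simp [PySem.Set.update]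
  | cons f l ih => simp [ih, pv_step_keys, PySem.Set.update_cons]

-- ---- the two inner loop bodies produce pvBody ----
lemma pv_innerA_eq : pvInnerA = fun output f => output ++ pvRender (pvBody f) := by
  funext output f
  unfold pvInnerA pvBody pvRender
  by_cases h1 : PySem.Dict.getD (⟨f⟩ : PySem.Dict String String) "home_team" "" ≠ "" ∧
      PySem.Dict.getD (⟨f⟩ : PySem.Dict String String) "away_team" "" ≠ "" <;>
    by_cases h2 : PySem.Dict.getD (⟨f⟩ : PySem.Dict String String) "venue" "" ≠ "" <;>
      by_cases h3 : PySem.Dict.getD (⟨f⟩ : PySem.Dict String String) "league" "" ≠ "" <;>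
        simp [h1, h2, h3, String.join, ← String.append_assoc]

lemma pv_innerB_eq (t : String) :
    pvInnerB t = fun lines f => if pvTk f == t then lines ++ pvBody f else lines := by
  funext lines f
  unfold pvInnerB pvBody pvTk
  by_cases ht : PySem.Dict.getD (⟨f⟩ : PySem.Dict String String) "time" "TBC" = t
  · simp only [ht]
    by_cases h1 : PySem.Dict.getD (⟨f⟩ : PySem.Dict String String) "home_team" "" ≠ "" ∧
        PySem.Dict.getD (⟨f⟩ : PySem.Dict String String) "away_team" "" ≠ "" <;>
      by_cases h2 : PySem.Dict.getD (⟨f⟩ : PySem.Dict String String) "venue" "" ≠ "" <;>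
        by_cases h3 : PySem.Dict.getD (⟨f⟩ : PySem.Dict String String) "league" "" ≠ "" <;>
          simp [h1, h2, h3]
  · simp [ht]

-- ---- each port equals pvRender (pvAll fixtures) on a nonempty input ----
lemma pv_A_eq (fixtures : List (List (String × String))) (h : ¬ fixtures = []) :
    format_fixtures_output fixtures = pvRender (pvAll fixtures) := by
  unfold format_fixtures_output
  rw [if_neg h]
  show (PySem.List.sorted (fixtures.foldl pvStep PySem.Dict.empty).keys
      (fun x => if x ≠ "TBC" then x else "ZZ:ZZ") false).foldl
      (fun output time_slot =>
        ((fixtures.foldl pvStep PySem.Dict.empty).getD time_slot []).foldl pvInnerA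
          (output ++ "🕐 " ++ time_slot ++ "\n" ++ "--------------------" ++ "\n"))
      ("🦂 Scawthorpe Scorpions Boys Fixtures - 01/03/2026\n" ++
        "============================================================" ++ "\n\n")
      ++ "📊 Total Fixtures: " ++ PySem.Int.toStr (fixtures.length : Int) ++ "\n"
    = pvRender (pvAll fixtures)
  rw [pv_fold_keys, PySem.Dict.keys_empty, PySem.Set.update_nil_left,
    show (fun x : String => if x ≠ "TBC" then x else "ZZ:ZZ")
       = (fun t : String => if t = "TBC" then "ZZ:ZZ" else t) by
      funext x; by_cases hx : x = "TBC" <;> simp [hx],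
    pv_innerA_eq]
  simp only [pv_fold_getD, PySem.Dict.getD_empty, List.nil_append, pv_strFoldl_map,
    String.append_assoc]
  simp only [pvAll, pvGroup, pvTimes, pvF, pvTk, List.cons_append,
    List.nil_append, pv_render_cons, pv_render_append, pv_render_flatMap, pv_render_nil, pvTk_def]
  simp [pv_dash_split, ← String.append_assoc]

lemma pv_B_eq (fixtures : List (List (String × String))) (h : ¬ fixtures = []) :
    format_fixtures_output_alt fixtures = pvRender (pvAll fixtures) := by
  unfold format_fixtures_output_alt
  rw [if_neg h]
  show PySem.Str.join "\n"
      ((PySem.List.sorted (PySem.List.dedup (fixtures.map (fun f => PySem.Dict.getD ⟨f⟩ "time" "TBC")))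
          (fun t => if t = "TBC" then "ZZ:ZZ" else t) false).foldl
        (fun lines t => fixtures.foldl (pvInnerB t)
          (lines ++ ["🕐 " ++ t] ++ ["--------------------"]))
        ["🦂 Scawthorpe Scorpions Boys Fixtures - 01/03/2026",
         "============================================================", ""]
       ++ ["📊 Total Fixtures: " ++ PySem.Int.toStr (fixtures.length : Int)]) ++ "\n"
    = pvRender (pvAll fixtures)
  rw [PySem.List.dedup_eq_ofList]
  simp only [pv_innerB_eq, PySem.List.foldl_if_eq_foldl_filter, PySem.List.foldl_append_eq_flatMap,
    List.append_assoc, List.cons_append, List.nil_append]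
  simp only [pv_joinNL]
  simp only [pvAll, pvGroup, pvTimes, pvF, pvTk, List.cons_append,
    List.nil_append, pv_render_cons, pv_render_append, pv_render_flatMap, pv_render_nil, pvTk_def]

-- ===== VERDICT (by name: the statement is the Claim_ definition above) =====
theorem format_fixtures_output_spec : Claim_equal_format_fixtures_output := by
  unfold Claim_equal_format_fixtures_output
  intro fixtures _ _
  unfold Spec_format_fixtures_output
  by_cases h : fixtures = []
  · subst h
    simp [format_fixtures_output, format_fixtures_output_alt]
  · rw [pv_A_eq fixtures h, pv_B_eq fixtures h]
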